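-- pv_equiv track=rewrite | github.com/postforty/Javascript-Python-Coding-Test-Study | programers_Lv2/기능개발.py | solution
-- ===== SOURCE A (Python) =====
-- def solution(progresses, speeds):
--     answer = []
--
--     days_list = []
--     for i, v in enumerate(progresses):
--         goal = v
--         days = 0
--         while goal < 100:
--             goal += speeds[i]
--             days += 1
--         days_list.append(days)
--     start = days_list[0]
--     cnt = 1
--     for i in days_list[1:]:
--         if start >= i:
--             cnt += 1
--         else:
--             answer.append(cnt)
--             cnt = 1
--             start = i
--     answer.append(cnt)
--
--     return answer
-- ===== SOURCE B (Python) =====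
-- def solution(progresses, speeds):
--     # closed-form ceiling division instead of day-by-day simulation
--     days = [0 if p >= 100 else -(-(100 - p) // speeds[i])
--             for i, p in enumerate(progresses)]
--     answer = []
--     deadline = 0
--     for d in days:
--         if answer and d <= deadline:
--             answer[-1] += 1
--         else:
--             answer.append(1)
--             deadline = d
--     return answer
-- ===== Notes on version B (the rewrite author's own statement) =====
-- stated objective: simpler
-- what changed: The per-task day-counting while loop is replaced by a closed-form integer ceiling division, and the grouping pass becomes a single fold over all days that bumps the last group in place instead of carrying a separate (cnt, start) pair plus a final append.
-- outside the precondition, e.g. on solution([], []): A raises IndexError, B returns []; on solution([50], [0]): A does not finish within the time limit, B raises ZeroDivisionError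
import Mathlib
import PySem

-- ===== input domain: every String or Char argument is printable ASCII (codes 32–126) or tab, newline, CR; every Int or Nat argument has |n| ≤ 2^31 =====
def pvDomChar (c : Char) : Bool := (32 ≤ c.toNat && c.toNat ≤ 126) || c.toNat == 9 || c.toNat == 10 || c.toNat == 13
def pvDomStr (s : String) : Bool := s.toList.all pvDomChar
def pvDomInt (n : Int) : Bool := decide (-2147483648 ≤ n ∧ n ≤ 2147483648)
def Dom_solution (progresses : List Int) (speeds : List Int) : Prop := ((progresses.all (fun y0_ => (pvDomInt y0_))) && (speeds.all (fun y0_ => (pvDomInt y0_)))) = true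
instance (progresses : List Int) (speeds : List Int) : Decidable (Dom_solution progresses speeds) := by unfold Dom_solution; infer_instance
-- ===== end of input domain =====

-- B replaces A's day-by-day while loop with a closed-form ceiling division and
-- folds the grouping over all days at once, bumping the last group in place.
-- Pre_ excludes inputs on which A raises (empty progresses: IndexError on days_list[0];
-- a task with progress < 100 whose speed index is missing: IndexError) or
-- diverges (a task with progress < 100 and a nonpositive speed).

-- ===== PORT A =====
-- the inner 'while goal < 100: goal += speeds[i]; days += 1' loop;
-- pyGet? = none (Python: IndexError) and nonpositive speed (Python: diverges) return junk, excluded by Pre_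
def loopA (speeds : List Int) (i : Int) (goal : Int) (days : Int) : Int :=
  if goal < 100 then
    match PySem.List.pyGet? speeds i with
    | none => days
    | some s => if 0 < s then loopA speeds i (goal + s) (days + 1) else days
  else days
termination_by (100 - goal).toNat
decreasing_by simp_all

-- the body of A's second for loop, state = (answer, cnt, start)
def stepA (st : List Int × Int × Int) (i : Int) : List Int × Int × Int :=
  if st.2.2 ≥ i then (st.1, st.2.1 + 1, st.2.2) else (st.1 ++ [st.2.1], 1, i)

def solution (progresses : List Int) (speeds : List Int) : List Int :=
  let days_list := (PySem.List.enumerate progresses).foldl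
    (fun acc iv => acc ++ [loopA speeds iv.1 iv.2 0]) []
  match PySem.List.pyGet? days_list 0 with
  | none => []   -- Python: IndexError on days_list[0]; excluded by Pre_
  | some start0 =>
    let st := (PySem.List.slice days_list (some 1) none).foldl stepA ([], 1, start0)
    st.1 ++ [st.2.1]

-- ===== PORT B =====
-- '0 if p >= 100 else -(-(100 - p) // speeds[i])'
def ceilDays (speeds : List Int) (i : Int) (p : Int) : Int :=
  if p ≥ 100 then 0
  else match PySem.List.pyGet? speeds i with
       | some s => -(PySem.Int.floordiv (-(100 - p)) s)
       | none => 0   -- Python: IndexError; excluded by Pre_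

-- the body of B's for loop, state = (answer, deadline)
def stepB (st : List Int × Int) (d : Int) : List Int × Int :=
  if st.1 ≠ [] ∧ d ≤ st.2 then (st.1.dropLast ++ [st.1.getLast?.getD 0 + 1], st.2)
  else (st.1 ++ [1], d)

def solution_alt (progresses : List Int) (speeds : List Int) : List Int :=
  let days := (PySem.List.enumerate progresses).map (fun ip => ceilDays speeds ip.1 ip.2)
  (days.foldl stepB ([], 0)).1

-- ===== PRECONDITION & SPEC =====
-- Pre_ admits exactly the inputs where A returns: a nonempty task list, and every
-- unfinished task (progress < 100) has a positive speed at its index.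
def Pre_solution (progresses : List Int) (speeds : List Int) : Prop :=
  progresses ≠ [] ∧ ∀ i, (h : i < progresses.length) →
    100 ≤ progresses[i] ∨ (∃ h2 : i < speeds.length, 0 < speeds[i])
instance (progresses : List Int) (speeds : List Int) : Decidable (Pre_solution progresses speeds) := by
  unfold Pre_solution; infer_instance

def pvWitness_solution : List Int × List Int := ([93, 30, 55], [1, 30, 5])

def Spec_solution (progresses : List Int) (speeds : List Int) (out : List Int) : Prop := out = solution_alt progresses speeds
instance (progresses : List Int) (speeds : List Int) (out : List Int) : Decidable (Spec_solution progresses speeds out) := by unfold Spec_solution; infer_instance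

-- ===== CLAIM (what is proved, stated in full; the proofs are below) =====
def Claim_equal_solution : Prop := ∀ (progresses : List Int) (speeds : List Int), Dom_solution progresses speeds → Pre_solution progresses speeds → Spec_solution progresses speeds (solution progresses speeds)

-- ===== LEMMAS AND PROOFS =====

-- closed form of A's while loop when the speed exists and is positive
lemma loopA_eq (speeds : List Int) (i s : Int)
    (hget : PySem.List.pyGet? speeds i = some s) (hs : 0 < s) :
    ∀ goal days, loopA speeds i goal days =
      days + (if goal < 100 then -(PySem.Int.floordiv (goal - 100) s) else 0) := by
  suffices H : ∀ n goal days, (100 - goal).toNat ≤ n →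
      loopA speeds i goal days =
        days + (if goal < 100 then -(PySem.Int.floordiv (goal - 100) s) else 0) by
    intro goal days; exact H (100 - goal).toNat goal days le_rfl
  intro n
  induction n with
  | zero =>
    intro goal days h
    have hg : ¬ goal < 100 := by omega
    rw [loopA.eq_def]; simp [hg]
  | succ n ih =>
    intro goal days h
    rw [loopA.eq_def]
    by_cases hg : goal < 100
    · simp only [hg, if_pos, hget, hs]
      rw [ih (goal + s) (days + 1) (by omega)]
      by_cases hg2 : goal + s < 100
      · simp only [hg2, if_pos]
        have hq : PySem.Int.floordiv (goal + s - 100) s =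
            PySem.Int.floordiv (goal - 100) s + 1 := by
          have hb := (PySem.Int.floordiv_eq_iff_of_pos (a := goal - 100)
            (q := PySem.Int.floordiv (goal - 100) s) hs).mp rfl
          refine (PySem.Int.floordiv_eq_iff_of_pos hs).mpr ?_
          have e1 : (PySem.Int.floordiv (goal - 100) s + 1) * s =
              PySem.Int.floordiv (goal - 100) s * s + s := by ring
          have e2 : (PySem.Int.floordiv (goal - 100) s + 1 + 1) * s =
              (PySem.Int.floordiv (goal - 100) s + 1) * s + s := by ring
          constructor
          · rw [e1]; omega
          · rw [e2, e1]; omega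
        rw [hq]; ring
      · simp only [hg2, if_neg, not_false_iff]
        have hq : PySem.Int.floordiv (goal - 100) s = -1 := by
          refine (PySem.Int.floordiv_eq_iff_of_pos hs).mpr ?_
          have e1 : (-1 : Int) * s = -s := by ring
          have e2 : ((-1 : Int) + 1) * s = 0 := by ring
          rw [e1, e2]
          omega
        rw [hq]; ring
    · simp [hg]

-- the fold building A's days_list is a map
lemma foldl_append_map {α β : Type} (f : α → β) :
    ∀ (xs : List α) (acc : List β),
      xs.foldl (fun a x => a ++ [f x]) acc = acc ++ xs.map f := by
  intro xs
  induction xs with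
  | nil => simp
  | cons x xs ih => intro acc; simp [ih]

-- pointwise congruence of maps over enumerate
lemma map_enumerate_congr {α : Type} (f g : Int × α → Int) :
    ∀ (xs : List α) (s : Int),
      (∀ k : Nat, (h : k < xs.length) → f (s + k, xs[k]) = g (s + k, xs[k])) →
      (PySem.List.enumerate xs s).map f = (PySem.List.enumerate xs s).map g := by
  intro xs
  induction xs with
  | nil => intro s _; simp [PySem.List.enumerate_nil]
  | cons x xs ih =>
    intro s hfg
    rw [PySem.List.enumerate_cons, List.map_cons, List.map_cons]
    have h0 := hfg 0 (by simp)
    simp only [Nat.cast_zero, add_zero, List.getElem_cons_zero] at h0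
    rw [h0]
    congr 1
    apply ih
    intro k hk
    have h1 := hfg (k + 1) (by simp; omega)
    simp only [List.getElem_cons_succ, Nat.cast_add, Nat.cast_one] at h1
    have e : s + ((k : Int) + 1) = s + 1 + k := by ring
    rw [e] at h1
    exact h1
-- the grouping folds correspond: B's answer is A's answer with the running cnt appended
lemma group_eq : ∀ (rest ans : List Int) (cnt start : Int),
    rest.foldl stepB (ans ++ [cnt], start) =
      ((rest.foldl stepA (ans, cnt, start)).1 ++ [(rest.foldl stepA (ans, cnt, start)).2.1],
       (rest.foldl stepA (ans, cnt, start)).2.2) := by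
  intro rest
  induction rest with
  | nil => intro ans cnt start; simp
  | cons d rest ih =>
    intro ans cnt start
    simp only [List.foldl_cons]
    by_cases hc : start ≥ d
    · have hA : stepA (ans, cnt, start) d = (ans, cnt + 1, start) := by
        simp [stepA, hc]
      have hB : stepB (ans ++ [cnt], start) d = (ans ++ [cnt + 1], start) := by
        simp [stepB, hc]
      rw [hA, hB, ih]
    · have hA : stepA (ans, cnt, start) d = (ans ++ [cnt], 1, d) := by
        simp [stepA, hc]
      have hB : stepB (ans ++ [cnt], start) d = ((ans ++ [cnt]) ++ [1], d) := by
        simp [stepB]; omega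
      rw [hA, hB, ih]

-- the two days lists coincide under Pre_
lemma days_eq (progresses speeds : List Int)
    (hpre : ∀ i, (h : i < progresses.length) →
      100 ≤ progresses[i] ∨ (∃ h2 : i < speeds.length, 0 < speeds[i])) :
    (PySem.List.enumerate progresses).map (fun iv => loopA speeds iv.1 iv.2 0) =
      (PySem.List.enumerate progresses).map (fun ip => ceilDays speeds ip.1 ip.2) := by
  apply map_enumerate_congr
  intro k h
  simp only [zero_add]
  rcases hpre k h with hdone | ⟨h2, hs⟩
  · have hng : ¬ progresses[k] < 100 := by omega
    rw [loopA.eq_def]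
    simp [hng, ceilDays, hdone]
  · have hget : PySem.List.pyGet? speeds (k : Int) = some speeds[k] := by
      simp [List.getElem?_eq_getElem h2]
    rw [loopA_eq speeds (k : Int) speeds[k] hget hs]
    by_cases hlt : progresses[k] < 100
    · have e : -(100 - progresses[k]) = progresses[k] - 100 := by ring
      simp [ceilDays, hget, hlt, show ¬ progresses[k] ≥ 100 by omega, e]
    · simp [ceilDays, hlt, show progresses[k] ≥ 100 by omega]

-- ===== VERDICT (by name: the statement is the Claim_ definition above) =====
theorem solution_spec : Claim_equal_solution := by
  intro p sp _ hpre
  show solution p sp = solution_alt p sp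
  obtain ⟨hne, hcond⟩ := hpre
  unfold solution solution_alt
  rw [foldl_append_map (fun iv : Int × Int => loopA sp iv.1 iv.2 0), List.nil_append,
      days_eq p sp hcond]
  set days := (PySem.List.enumerate p).map (fun ip => ceilDays sp ip.1 ip.2) with hdays
  have hlen : days ≠ [] := by
    have : (PySem.List.enumerate p).length = p.length := PySem.List.length_enumerate ..
    simp only [hdays, ne_eq, List.map_eq_nil_iff]
    intro hnil
    exact hne (by cases p <;> simp_all)
  obtain ⟨d0, rest, hcons⟩ := List.exists_cons_of_ne_nil hlen
  rw [hcons]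
  simp only [PySem.List.pyGet?_zero_cons, PySem.List.slice_from_one,
    List.tail_cons, List.foldl_cons]
  have h1 : stepB ([], 0) d0 = ([] ++ [1], d0) := by simp [stepB]
  rw [h1, group_eq rest [] 1 d0]
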